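-- pv_equiv track=rewrite | github.com/d33p5h4d0w/HSCTF-6 | bit/exp.py | flip_dword
-- ===== SOURCE A (Python) =====
-- def flipper(curr, req):
--     flips = curr ^ req
--     for i in range(8):
--         if flips & (1<<i):
--             yield str(i)
--
-- def flip_dword(addr, curr, req):
--     payload = []
--     for i in range(4):
--         if curr == req:
--             break
--         inp_addr = str(hex(addr))[2:]
--         flip_bits = list(flipper(curr&0xff, req&0xff))
--         addr += 1
--         curr = curr >> 8
--         req = req >> 8
--         payload.append((inp_addr, flip_bits))
--
--     return payload
-- ===== SOURCE B (Python) =====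
-- def _bits(byte):
--     # ascending set-bit positions, by repeatedly clearing the lowest set bit
--     out = []
--     while byte:
--         low = byte & -byte
--         out.append(str(low.bit_length() - 1))
--         byte ^= low
--     return out
--
-- def flip_dword(addr, curr, req):
--     def go(addr, diff, k):
--         if k == 0 or diff == 0:
--             return []
--         rest, byte = divmod(diff, 256)
--         return [(hex(addr)[2:], _bits(byte))] + go(addr + 1, rest, k - 1)
--     return go(addr, curr ^ req, 4)
-- ===== Notes on version B (the rewrite author's own statement) =====
-- stated objective: alternative
-- what changed: B is a recursive byte-peeling pass: it computes diff = curr ^ req once and recurses with divmod(diff, 256) to split off one byte per call (stopping when the remainder is 0 or 4 bytes are emitted), and extracts each byte's set-bit positions by repeatedly clearing the lowest set bit (byte & -byte, bit_length) instead of A's loop that mutates addr/curr/req in lockstep and tests each of the 8 bit indices per byte.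
import Mathlib
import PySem

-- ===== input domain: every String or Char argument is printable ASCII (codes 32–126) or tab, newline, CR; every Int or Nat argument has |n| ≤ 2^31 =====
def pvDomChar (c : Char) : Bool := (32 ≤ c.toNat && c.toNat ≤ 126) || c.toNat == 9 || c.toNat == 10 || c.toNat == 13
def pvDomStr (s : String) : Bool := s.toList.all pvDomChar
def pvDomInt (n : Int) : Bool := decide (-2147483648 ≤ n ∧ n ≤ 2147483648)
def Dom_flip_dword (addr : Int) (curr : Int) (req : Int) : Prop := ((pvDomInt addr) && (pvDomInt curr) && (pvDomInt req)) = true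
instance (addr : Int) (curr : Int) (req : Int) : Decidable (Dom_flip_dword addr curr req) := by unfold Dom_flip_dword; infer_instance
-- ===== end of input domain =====

-- B is a recursive byte-peeling pass: it xors once, splits one byte per recursive call
-- with divmod(diff, 256), and lists each byte's set bits by clearing the lowest set bit,
-- instead of A's loop mutating addr/curr/req that tests all 8 bit indices per byte.

-- hex(n) as a list of characters (Python's hex builtin; '-0x…' for negatives,
-- lowercase digits).  Shared by both ports, which each apply Python's [2:] slice.
def pvHexDigits (n : Nat) : List Char :=
  if n < 16 then [Nat.digitChar n]
  else pvHexDigits (n / 16) ++ [Nat.digitChar (n % 16)]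
decreasing_by exact Nat.div_lt_self (by omega) (by omega)

def pvHex (n : Int) : List Char :=
  if n < 0 then '-' :: '0' :: 'x' :: pvHexDigits (-n).toNat
  else '0' :: 'x' :: pvHexDigits n.toNat

-- ===== PORT A =====
-- flipper(curr, req): the generator, materialised as the list it yields
def pvFlipper (curr : Int) (req : Int) : List String :=
  let flips := PySem.Int.bxor curr req
  (PySem.List.pyRange 0 8 1).foldl
    (fun acc i => if PySem.Int.band flips ((1 : Int) <<< i) ≠ 0
                  then acc ++ [PySem.Int.toStr i] else acc) []

-- the 'for i in range(4)' loop with its break, as fuelled recursion over the same state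
def pvLoopA : Nat → Int → Int → Int → List (String × List String) → List (String × List String)
  | 0, _, _, _, payload => payload
  | k + 1, addr, curr, req, payload =>
    if curr = req then payload
    else pvLoopA k (addr + 1) (curr >>> (8 : Int)) (req >>> (8 : Int))
      (payload ++ [(String.mk (PySem.List.slice (pvHex addr) (some 2) none),
                    pvFlipper (PySem.Int.band curr 255) (PySem.Int.band req 255))])

def flip_dword (addr : Int) (curr : Int) (req : Int) : List (String × List String) :=
  pvLoopA 4 addr curr req []

-- ===== PORT B =====
-- _bits(byte): the 'while byte' loop; the fuel 8 is a totality guard only — every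
-- call site passes 0 ≤ byte < 256, and each iteration clears one of its ≤ 8 set bits
def pvBitsGo : Nat → Int → List String → List String
  | 0, _, acc => acc
  | f + 1, byte, acc =>
    if byte ≠ 0 then
      let low := PySem.Int.band byte (-byte)
      pvBitsGo f (PySem.Int.bxor byte low)
        (acc ++ [PySem.Int.toStr ((PySem.Int.bitLength low : Int) - 1)])
    else acc

def pvBits (byte : Int) : List String := pvBitsGo 8 byte []

-- go(addr, diff, k); divmod(diff, 256) is ported as its two components
-- (floordiv, mod), exact since the divisor 256 is nonzero
def pvGoB : Nat → Int → Int → List (String × List String)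
  | 0, _, _ => []
  | k + 1, addr, diff =>
    if diff = 0 then []
    else
      let rest := PySem.Int.floordiv diff 256
      let byte := PySem.Int.mod diff 256
      [(String.mk (PySem.List.slice (pvHex addr) (some 2) none), pvBits byte)]
        ++ pvGoB k (addr + 1) rest

def flip_dword_alt (addr : Int) (curr : Int) (req : Int) : List (String × List String) :=
  pvGoB 4 addr (PySem.Int.bxor curr req)

-- ===== PRECONDITION & SPEC =====
def Spec_flip_dword (addr : Int) (curr : Int) (req : Int) (out : List (String × List String)) : Prop := out = flip_dword_alt addr curr req
instance (addr : Int) (curr : Int) (req : Int) (out : List (String × List String)) : Decidable (Spec_flip_dword addr curr req out) := by unfold Spec_flip_dword; infer_instance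

-- ===== CLAIM (what is proved, stated in full; the proofs are below) =====
def Claim_equal_flip_dword : Prop := ∀ (addr : Int) (curr : Int) (req : Int), Dom_flip_dword addr curr req → Spec_flip_dword addr curr req (flip_dword addr curr req)

-- ===== LEMMAS AND PROOFS =====

theorem pv_negSucc_not_nonneg (n : Nat) : ¬ (0:Int) ≤ Int.negSucc n := by
  simp [Int.negSucc_eq]; omega

theorem pv_negSucc_toNat (n : Nat) : (-(Int.negSucc n) - 1).toNat = n := by
  simp [Int.negSucc_eq]

theorem pv_toNat_255 : (255 : Int).toNat = 255 := rfl

theorem pv_bxor_ofNat_negSucc (m n : Nat) :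
    PySem.Int.bxor ((m : Nat) : Int) (Int.negSucc n) = Int.negSucc (m ^^^ n) := by
  simp only [PySem.Int.bxor, Int.natCast_nonneg, if_true, pv_negSucc_not_nonneg, if_false,
    Int.toNat_natCast, pv_negSucc_toNat]
  simp [Int.negSucc_eq]; ring

theorem pv_bxor_negSucc_ofNat (m n : Nat) :
    PySem.Int.bxor (Int.negSucc m) ((n : Nat) : Int) = Int.negSucc (m ^^^ n) := by
  simp only [PySem.Int.bxor, Int.natCast_nonneg, if_true, pv_negSucc_not_nonneg, if_false,
    Int.toNat_natCast, pv_negSucc_toNat]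
  simp [Int.negSucc_eq]; ring

theorem pv_bxor_negSucc_negSucc (m n : Nat) :
    PySem.Int.bxor (Int.negSucc m) (Int.negSucc n) = ((m ^^^ n : Nat) : Int) := by
  simp only [PySem.Int.bxor, pv_negSucc_not_nonneg, if_false, pv_negSucc_toNat]

theorem pv_band_ofNat_255 (m : Nat) :
    PySem.Int.band ((m : Nat) : Int) 255 = ((m &&& 255 : Nat) : Int) := by
  simp only [PySem.Int.band, Int.natCast_nonneg, if_true, Int.toNat_natCast]
  norm_num [pv_toNat_255]

theorem pv_band_negSucc_255 (m : Nat) :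
    PySem.Int.band (Int.negSucc m) 255 = ((255 - (255 &&& m) : Nat) : Int) := by
  simp only [PySem.Int.band, pv_negSucc_not_nonneg, if_false, pv_negSucc_toNat]
  norm_num [pv_toNat_255]

theorem pv_band_ofNat_pow_ne (m : Nat) (b : Nat) :
    (PySem.Int.band ((m : Nat) : Int) ((2 ^ b : Nat) : Int) ≠ 0) ↔ m.testBit b := by
  simp only [PySem.Int.band, Int.natCast_nonneg, if_true, Int.toNat_natCast]
  rw [Nat.and_two_pow]
  rcases h : m.testBit b <;> simp

theorem pv_band_negSucc_pow_ne (m : Nat) (b : Nat) :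
    (PySem.Int.band (Int.negSucc m) ((2 ^ b : Nat) : Int) ≠ 0) ↔ ¬ m.testBit b := by
  simp only [PySem.Int.band, pv_negSucc_not_nonneg, if_false, Int.natCast_nonneg, if_true,
    Int.toNat_natCast, pv_negSucc_toNat]
  rw [Nat.and_comm, Nat.and_two_pow]
  rcases h : m.testBit b <;> simp

theorem pv_one_shiftLeft (b : Nat) : ((1 : Int) <<< ((b : Nat) : Int)) = ((2 ^ b : Nat) : Int) := by
  rw [Int.one_shiftLeft]

theorem pv_shiftRight_ofNat (m k : Nat) :
    (((m : Nat) : Int) >>> ((k : Nat) : Int)) = ((m >>> k : Nat) : Int) :=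
  Int.shiftRight_natCast m k

theorem pv_shiftRight_negSucc (m k : Nat) :
    ((Int.negSucc m) >>> ((k : Nat) : Int)) = Int.negSucc (m >>> k) :=
  Int.shiftRight_negSucc m k

theorem pv_nat_shiftRight_xor (m n k : Nat) : (m ^^^ n) >>> k = (m >>> k) ^^^ (n >>> k) := by
  apply Nat.eq_of_testBit_eq
  intro i
  simp [Nat.testBit_shiftRight, Nat.testBit_xor]

theorem pv_bxor_shiftRight (x y : Int) :
    PySem.Int.bxor (x >>> (8 : Int)) (y >>> (8 : Int)) = (PySem.Int.bxor x y) >>> (8 : Int) := by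
  rw [show (8 : Int) = ((8 : Nat) : Int) from rfl]
  rcases x with m | m <;> rcases y with n | n <;>
    simp only [Int.ofNat_eq_natCast, pv_shiftRight_ofNat, pv_shiftRight_negSucc,
      PySem.Int.bxor_natCast, pv_bxor_ofNat_negSucc, pv_bxor_negSucc_ofNat,
      pv_bxor_negSucc_negSucc, pv_nat_shiftRight_xor]

theorem pv_bxor_eq_zero_iff (x y : Int) : PySem.Int.bxor x y = 0 ↔ x = y := by
  rcases x with m | m <;> rcases y with n | n <;>
    simp only [Int.ofNat_eq_natCast, PySem.Int.bxor_natCast, pv_bxor_ofNat_negSucc,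
      pv_bxor_negSucc_ofNat, pv_bxor_negSucc_negSucc]
  · constructor
    · intro h; have : m ^^^ n = 0 := by exact_mod_cast h
      exact_mod_cast Nat.xor_eq_zero_iff.mp this
    · rintro h; have : m = n := by exact_mod_cast h
      subst this; simp
  · constructor
    · intro h; exact absurd h (by simp [Int.negSucc_eq]; omega)
    · intro h; exact absurd h (by simp [Int.negSucc_eq]; omega)
  · constructor
    · intro h; exact absurd h (by simp [Int.negSucc_eq]; omega)
    · intro h; exact absurd h (by simp [Int.negSucc_eq]; omega)
  · constructor
    · intro h; have : m ^^^ n = 0 := by exact_mod_cast h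
      have := Nat.xor_eq_zero_iff.mp this; subst this; rfl
    · intro h; have : m = n := by omega
      subst this; simp

theorem pv_testBit_low (m b : Nat) (hb : b < 8) : (m &&& 255).testBit b = m.testBit b := by
  rw [Nat.testBit_and, show (255:Nat) = 2^8 - 1 from rfl, Nat.testBit_two_pow_sub_one]
  simp [hb]

set_option maxRecDepth 8192 in
theorem pv_sub_low (t : Nat) (ht : t < 256) : 255 - t = 255 ^^^ t := by
  revert ht; revert t; decide

theorem pv_testBit_low_neg (m b : Nat) (hb : b < 8) :
    (255 - (255 &&& m)).testBit b = !(m.testBit b) := by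
  rw [pv_sub_low _ (by have := Nat.and_le_left (n := 255) (m := m); omega),
    Nat.testBit_xor, Nat.and_comm, pv_testBit_low m b hb,
    show (255:Nat) = 2^8 - 1 from rfl, Nat.testBit_two_pow_sub_one]
  simp [hb]

theorem pv_cond_iff (x y : Int) (b : Nat) (hb : b < 8) :
    (PySem.Int.band (PySem.Int.bxor (PySem.Int.band x 255) (PySem.Int.band y 255))
        ((2 ^ b : Nat) : Int) ≠ 0)
      ↔ (PySem.Int.band (PySem.Int.bxor x y) ((2 ^ b : Nat) : Int) ≠ 0) := by
  rcases x with m | m <;> rcases y with n | n <;>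
    simp only [Int.ofNat_eq_natCast, pv_band_ofNat_255, pv_band_negSucc_255,
      PySem.Int.bxor_natCast, pv_bxor_ofNat_negSucc, pv_bxor_negSucc_ofNat,
      pv_bxor_negSucc_negSucc, pv_band_ofNat_pow_ne, pv_band_negSucc_pow_ne,
      Nat.testBit_xor, pv_testBit_low m b hb, pv_testBit_low n b hb,
      pv_testBit_low_neg m b hb, pv_testBit_low_neg n b hb] <;>
    rcases m.testBit b <;> rcases n.testBit b <;> simp

-- A's flipper output, as a filter over the bits of the unshifted xor
theorem pv_flipper_eq (x y : Int) :
    pvFlipper (PySem.Int.band x 255) (PySem.Int.band y 255)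
      = ((List.range 8).filter
           (fun (b : Nat) => PySem.Int.band (PySem.Int.bxor x y) ((1 : Int) <<< (b : Int)) != 0)).map
          (fun (b : Nat) => PySem.Int.toStr (b : Int)) := by
  simp only [pvFlipper]
  have hlam : (fun (acc : List String) (i : Int) =>
        if PySem.Int.band (PySem.Int.bxor (PySem.Int.band x 255) (PySem.Int.band y 255)) ((1 : Int) <<< i) ≠ 0
        then acc ++ [PySem.Int.toStr i] else acc)
      = (fun (acc : List String) (i : Int) =>
        if (fun i => decide (PySem.Int.band (PySem.Int.bxor (PySem.Int.band x 255) (PySem.Int.band y 255)) ((1 : Int) <<< i) ≠ 0)) i = true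
        then acc ++ [PySem.Int.toStr i] else acc) := by
    funext acc i
    simp only [decide_eq_true_eq]
  rw [hlam, PySem.List.foldl_append_if]
  rw [show PySem.List.pyRange 0 8 1 = (List.range 8).map (fun (b : Nat) => (b : Int)) from rfl]
  rw [List.filter_map, List.map_map]
  rw [List.nil_append]
  have hfil : ∀ b ∈ List.range 8,
      ((fun i => decide (PySem.Int.band (PySem.Int.bxor (PySem.Int.band x 255) (PySem.Int.band y 255)) ((1 : Int) <<< i) ≠ 0)) ∘ (fun (b : Nat) => (b : Int))) b
        = (fun (b : Nat) => PySem.Int.band (PySem.Int.bxor x y) ((1 : Int) <<< (b : Int)) != 0) b := by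
    intro b hb
    have hb8 : b < 8 := List.mem_range.mp hb
    have hiff := pv_cond_iff x y b hb8
    simp only [Function.comp_apply, pv_one_shiftLeft]
    have hbne : ∀ z : Int, (z != 0) = decide (z ≠ 0) := by
      intro z; by_cases h : z = 0 <;> simp [h]
    rw [hbne]
    exact decide_eq_decide.mpr hiff
  rw [List.filter_congr hfil]
  rfl

-- B's _bits on a byte value, as the same filter over that byte's bits (all 256 bytes)
set_option maxRecDepth 8192 in
theorem pv_bits_fin (u : Fin 256) :
    pvBits ((u.val : Nat) : Int)
      = ((List.range 8).filter (fun (b : Nat) => u.val.testBit b)).map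
          (fun (b : Nat) => PySem.Int.toStr (b : Int)) := by
  revert u; decide

-- the remainder Python's divmod(d, 256) hands to _bits, as an explicit byte value
theorem pv_mod256_ofNat (m : Nat) :
    PySem.Int.mod ((m : Nat) : Int) 256 = ((m % 256 : Nat) : Int) := by
  rw [show (256 : Int) = ((256 : Nat) : Int) from rfl, PySem.Int.mod_natCast]

theorem pv_mod256_negSucc (m : Nat) :
    PySem.Int.mod (Int.negSucc m) 256 = ((255 - (255 &&& m) : Nat) : Int) := by
  rw [PySem.Int.mod_eq_emod_of_pos (by omega)]
  have h255 : 255 &&& m = m % 256 := by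
    rw [Nat.and_comm, show (255:Nat) = 2^8 - 1 from rfl, Nat.and_two_pow_sub_one_eq_mod]
  rw [h255, Int.negSucc_eq]
  have hm : m % 256 < 256 := Nat.mod_lt _ (by omega)
  omega

-- the entry B builds from divmod's remainder equals the entry A builds from the low bytes
theorem pv_bits_mod_eq_flipper (x y : Int) :
    pvBits (PySem.Int.mod (PySem.Int.bxor x y) 256)
      = pvFlipper (PySem.Int.band x 255) (PySem.Int.band y 255) := by
  rw [pv_flipper_eq]
  rcases hd : PySem.Int.bxor x y with m | m
  · have hm : m % 256 < 256 := Nat.mod_lt _ (by omega)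
    rw [Int.ofNat_eq_natCast, pv_mod256_ofNat, pv_bits_fin ⟨m % 256, hm⟩]
    congr 1
    apply List.filter_congr
    intro b hb
    have hb8 : b < 8 := List.mem_range.mp hb
    have ht : (m % 256).testBit b = m.testBit b := by
      rw [show (256:Nat) = 2^8 from rfl, Nat.testBit_mod_two_pow]
      simp [hb8]
    have hbne : ∀ z : Int, (z != 0) = decide (z ≠ 0) := by
      intro z; by_cases h : z = 0 <;> simp [h]
    rw [pv_one_shiftLeft, hbne]
    show ((⟨m % 256, hm⟩ : Fin 256)).val.testBit b
        = decide (PySem.Int.band ((m : Nat) : Int) ((2 ^ b : Nat) : Int) ≠ 0)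
    rw [show ((⟨m % 256, hm⟩ : Fin 256)).val = m % 256 from rfl, ht]
    rcases hmb : m.testBit b with _ | _
    · exact (decide_eq_false (fun h => by rw [(pv_band_ofNat_pow_ne m b).mp h] at hmb; cases hmb)).symm
    · exact (decide_eq_true ((pv_band_ofNat_pow_ne m b).mpr hmb)).symm
  · have hu : 255 - (255 &&& m) < 256 := by
      have := Nat.and_le_left (n := 255) (m := m); omega
    rw [pv_mod256_negSucc, pv_bits_fin ⟨255 - (255 &&& m), hu⟩]
    congr 1
    apply List.filter_congr
    intro b hb
    have hb8 : b < 8 := List.mem_range.mp hb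
    have ht := pv_testBit_low_neg m b hb8
    have hbne : ∀ z : Int, (z != 0) = decide (z ≠ 0) := by
      intro z; by_cases h : z = 0 <;> simp [h]
    rw [pv_one_shiftLeft, hbne]
    show ((⟨255 - (255 &&& m), hu⟩ : Fin 256)).val.testBit b
        = decide (PySem.Int.band (Int.negSucc m) ((2 ^ b : Nat) : Int) ≠ 0)
    rw [show ((⟨255 - (255 &&& m), hu⟩ : Fin 256)).val = 255 - (255 &&& m) from rfl, ht]
    rcases hmb : m.testBit b with _ | _
    · exact (decide_eq_true ((pv_band_negSucc_pow_ne m b).mpr (by simp [hmb]))).symm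
    · exact (decide_eq_false (fun h => (pv_band_negSucc_pow_ne m b).mp h (by simp [hmb]))).symm

-- A's '>> 8' on both operands is B's divmod quotient of the xor
theorem pv_shiftRight_eq_floordiv (d : Int) :
    d >>> (8 : Int) = PySem.Int.floordiv d 256 := by
  rcases d with m | m
  · rw [Int.ofNat_eq_natCast, show (8 : Int) = ((8 : Nat) : Int) from rfl, pv_shiftRight_ofNat,
      show (256 : Int) = ((256 : Nat) : Int) from rfl, PySem.Int.floordiv_natCast,
      Nat.shiftRight_eq_div_pow]
  · rw [show (8 : Int) = ((8 : Nat) : Int) from rfl, pv_shiftRight_negSucc,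
      PySem.Int.floordiv_eq_ediv_of_pos (by omega : (0:Int) < 256),
      Nat.shiftRight_eq_div_pow, Int.negSucc_eq, Int.negSucc_eq]
    rw [show ((2:Nat) ^ 8) = 256 from rfl]
    omega

-- A's loop equals B's recursion on the running xor
theorem pv_loopA_eq_goB (k : Nat) : ∀ (x y addr : Int) (acc : List (String × List String)),
    pvLoopA k addr x y acc = acc ++ pvGoB k addr (PySem.Int.bxor x y) := by
  induction k with
  | zero => intro x y addr acc; simp [pvLoopA, pvGoB]
  | succ k ih =>
    intro x y addr acc
    rw [pvLoopA, pvGoB]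
    by_cases hxy : x = y
    · rw [if_pos hxy, if_pos ((pv_bxor_eq_zero_iff x y).mpr hxy)]
      simp
    · rw [if_neg hxy, if_neg (fun h => hxy ((pv_bxor_eq_zero_iff x y).mp h)), ih]
      rw [pv_bxor_shiftRight, pv_shiftRight_eq_floordiv, ← pv_bits_mod_eq_flipper x y]
      simp

-- ===== VERDICT (by name: the statement is the Claim_ definition above) =====
theorem flip_dword_spec : Claim_equal_flip_dword := by
  intro addr curr req _
  show flip_dword addr curr req = flip_dword_alt addr curr req
  rw [flip_dword, flip_dword_alt, pv_loopA_eq_goB, List.nil_append]
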